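-- pv_equiv track=rewrite | github.com/FedchenkoGM/Yandex-WEB | 13_itog/v07_1.py | work
-- ===== SOURCE A (Python) =====
-- def work(z, s):
--     t = []
--     for i in range(len(s)):
--         if s[i] in z:
--             t.append(i)
--     mi = 10**10
--     if len(t) > 2:
--         for i in range(len(t) - 2):
--             if t[i + 2] - t[i] < mi:
--                 mi = t[i + 2] - t[i]
--     return mi + 1
-- ===== SOURCE B (Python) =====
-- def work(z, s):
--     # One pass: keep the last two matching indices in (a, b); a is the older.
--     zs = set(z)
--     a = b = None
--     mi = 10**10
--     for i, c in enumerate(s):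
--         if c in zs:
--             if a is not None:
--                 mi = min(mi, i - a)
--             a, b = b, i
--     return mi + 1
-- ===== Notes on version B (the rewrite author's own statement) =====
-- stated objective: alternative
-- what changed: Replaces the two-phase algorithm (collect all matching indices into a list, then scan that list for the minimal t[i+2]-t[i] gap) by a single pass over s that keeps only the last two matching indices in a sliding window and updates the minimum on the fly, using O(1) extra space instead of O(n).
import Mathlib
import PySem

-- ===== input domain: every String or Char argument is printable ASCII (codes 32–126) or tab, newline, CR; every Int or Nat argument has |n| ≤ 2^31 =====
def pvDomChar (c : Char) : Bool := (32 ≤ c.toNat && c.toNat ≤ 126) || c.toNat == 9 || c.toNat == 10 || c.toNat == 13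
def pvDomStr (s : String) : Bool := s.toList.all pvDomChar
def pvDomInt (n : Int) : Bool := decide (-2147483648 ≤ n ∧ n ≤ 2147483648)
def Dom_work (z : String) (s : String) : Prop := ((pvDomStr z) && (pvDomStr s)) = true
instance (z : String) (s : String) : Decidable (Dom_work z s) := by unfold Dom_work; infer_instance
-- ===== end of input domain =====

-- B replaces A's two-phase scheme (collect all matching indices, then scan for the minimal
-- two-apart gap) by a single pass keeping only the last two matching indices (alternative, O(1) space).


-- ===== PORT A =====
-- 's[i] in z' is ported as the single-character substring test Chars.isIn [cs[i]] z (exact);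
-- i ranges over range(len(s)) so the pyGetD default is never read.
def work (z : String) (s : String) : Int :=
  let cs := s.toList
  let t : List Int := (PySem.List.pyRange 0 (cs.length : Int) 1).foldl
      (fun t i => if PySem.Chars.isIn [PySem.List.pyGetD cs i ' '] z.toList then t ++ [i] else t) []
  let mi : Int := 10 ^ 10
  let mi := if 2 < t.length then
      (PySem.List.pyRange 0 ((t.length : Int) - 2) 1).foldl
        (fun mi i =>
          if PySem.List.pyGetD t (i + 2) 0 - PySem.List.pyGetD t i 0 < mi then
            PySem.List.pyGetD t (i + 2) 0 - PySem.List.pyGetD t i 0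
          else mi) mi
    else mi
  mi + 1

-- ===== PORT B =====
def work_alt (z : String) (s : String) : Int :=
  let zs : PySem.Set Char := PySem.Set.ofList z.toList
  let st := (PySem.List.enumerate s.toList 0).foldl
      (fun (st : Option Int × Option Int × Int) p =>
        if PySem.Set.contains zs p.2 then
          (st.2.1, some p.1,
            match st.1 with
            | some a => min st.2.2 (p.1 - a)
            | none => st.2.2)
        else st)
      (none, none, 10 ^ 10)
  st.2.2 + 1

-- ===== PRECONDITION & SPEC =====
def Spec_work (z : String) (s : String) (out : Int) : Prop := out = work_alt z s
instance (z : String) (s : String) (out : Int) : Decidable (Spec_work z s out) := by unfold Spec_work; infer_instance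

-- ===== CLAIM (what is proved, stated in full; the proofs are below) =====
def Claim_equal_work : Prop := ∀ (z : String) (s : String), Dom_work z s → Spec_work z s (work z s)

-- ===== LEMMAS AND PROOFS =====

-- B's window step at a matching index x.
def pvStep (x : Int) (st : Option Int × Option Int × Int) : Option Int × Option Int × Int :=
  (st.2.1, some x, match st.1 with | some a => min st.2.2 (x - a) | none => st.2.2)

def pvGapFold (l : List Int) (st : Option Int × Option Int × Int) :
    Option Int × Option Int × Int :=
  l.foldl (fun st x => pvStep x st) st

-- Minimum over t[i+2]-t[i], structurally.
def pvGmin : List Int → Int → Int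
  | a :: _b :: c :: rest, m => pvGmin (_b :: c :: rest) (if c - a < m then c - a else m)
  | _, m => m

lemma pvGapFold_some (l : List Int) : ∀ (a b m : Int),
    (pvGapFold l (some a, some b, m)).2.2 = pvGmin (a :: b :: l) m := by
  induction l with
  | nil => intro a b m; simp [pvGapFold, pvGmin]
  | cons x xs ih =>
      intro a b m
      show (pvGapFold xs (pvStep x (some a, some b, m))).2.2 = _
      rw [show pvStep x (some a, some b, m) = (some b, some x, min m (x - a)) from rfl, ih]
      show pvGmin (b :: x :: xs) (min m (x - a)) = pvGmin (b :: x :: xs) (if x - a < m then x - a else m)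
      congr 1; omega

lemma pvGapFold_none (t : List Int) (m : Int) :
    (pvGapFold t (none, none, m)).2.2 = pvGmin t m := by
  match t with
  | [] => rfl
  | [a] => rfl
  | a :: b :: l =>
      show (pvGapFold l (pvStep b (pvStep a (none, none, m)))).2.2 = _
      rw [show pvStep b (pvStep a (none, none, m)) = (some a, some b, m) from rfl,
        pvGapFold_some]

-- A's indexed inner loop over range(len(t)-2), in Nat form, computes pvGmin.
lemma pvRangeFold_gmin : ∀ (t : List Int) (m : Int),
    (List.range (t.length - 2)).foldl
      (fun mi k => if t.getD (k + 2) 0 - t.getD k 0 < mi then t.getD (k + 2) 0 - t.getD k 0 else mi)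
      m = pvGmin t m := by
  intro t m
  induction t, m using pvGmin.induct with
  | case2 t m h =>
      rcases t with _ | ⟨a, _ | ⟨b, _ | ⟨c, rest⟩⟩⟩
      · simp [pvGmin]
      · simp [pvGmin]
      · simp [pvGmin]
      · exact absurd rfl (h a b c rest)
  | case1 a b c rest m ih =>
      have hlen : (a :: b :: c :: rest).length - 2 = rest.length + 1 := by simp
      rw [hlen, List.range_succ_eq_map, List.foldl_cons, List.foldl_map]
      simp only [List.getD_cons_succ, List.getD_cons_zero]
      exact ih

-- 'c in z' (single-char substring test) and 'c in set(z)' agree.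
lemma pvIsIn_singleton (c : Char) (l : List Char) :
    PySem.Chars.isIn [c] l = PySem.Set.contains (PySem.Set.ofList l) c := by
  rw [Bool.eq_iff_iff, PySem.Chars.isIn_iff_infix, List.singleton_infix_iff, PySem.Set.contains]
  rw [List.contains_iff_mem, PySem.Set.mem_ofList]

lemma pvGmin_short (t : List Int) (h : ¬ 2 < t.length) (m : Int) : pvGmin t m = m := by
  rcases t with _ | ⟨a, _ | ⟨b, _ | ⟨c, rest⟩⟩⟩ <;> simp_all [pvGmin]

-- A's Int-indexed inner loop computes pvGmin.
lemma pvIntRangeFold (t : List Int) (m : Int) :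
    (PySem.List.pyRange 0 ((t.length : Int) - 2) 1).foldl
      (fun mi i =>
        if PySem.List.pyGetD t (i + 2) 0 - PySem.List.pyGetD t i 0 < mi then
          PySem.List.pyGetD t (i + 2) 0 - PySem.List.pyGetD t i 0
        else mi) m = pvGmin t m := by
  rw [PySem.List.pyRange_one, List.foldl_map]
  have h1 : ((t.length : Int) - 2 - 0).toNat = t.length - 2 := by omega
  rw [h1, ← pvRangeFold_gmin t m]
  apply PySem.List.foldl_congr_mem
  intro mi k _
  have h2 : (0 : Int) + (k : Int) + 2 = ((k + 2 : Nat) : Int) := by push_cast; ring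
  have h3 : (0 : Int) + (k : Int) = ((k : Nat) : Int) := by omega
  rw [h2, h3, PySem.List.pyGetD_natCast, PySem.List.pyGetD_natCast]

-- ===== VERDICT (by name: the statement is the Claim_ definition above) =====
theorem work_spec : Claim_equal_work := by
  unfold Claim_equal_work
  intro z s _
  unfold Spec_work work work_alt
  simp only []
  -- rewrite A's first loop: collected match indices
  rw [PySem.List.foldl_append_if_eq_filter
        (fun i => PySem.Chars.isIn [PySem.List.pyGetD s.toList i ' '] z.toList)]
  simp only [List.nil_append]
  set M : List Int := (PySem.List.pyRange 0 (s.toList.length : Int) 1).filter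
      (fun i => PySem.Chars.isIn [PySem.List.pyGetD s.toList i ' '] z.toList) with hM
  -- rewrite B's loop
  have hb : (PySem.List.enumerate s.toList 0).foldl
      (fun (st : Option Int × Option Int × Int) p =>
        if PySem.Set.contains (PySem.Set.ofList z.toList) p.2 then
          (st.2.1, some p.1,
            match st.1 with
            | some a => min st.2.2 (p.1 - a)
            | none => st.2.2)
        else st)
      (none, none, 10 ^ 10) = pvGapFold M (none, none, 10 ^ 10) := by
    have hbody : (fun (st : Option Int × Option Int × Int) (p : Int × Char) =>
        if PySem.Set.contains (PySem.Set.ofList z.toList) p.2 then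
          (st.2.1, some p.1,
            match st.1 with
            | some a => min st.2.2 (p.1 - a)
            | none => st.2.2)
        else st)
      = (fun (st : Option Int × Option Int × Int) (p : Int × Char) =>
          if PySem.Set.contains (PySem.Set.ofList z.toList) p.2 then pvStep p.1 st else st) := rfl
    rw [hbody, PySem.List.enumerate_eq_map_pyRange s.toList ' ',
        PySem.List.foldl_if_eq_foldl_filter
          (fun p : Int × Char => PySem.Set.contains (PySem.Set.ofList z.toList) p.2)
          (fun st (p : Int × Char) => pvStep p.1 st), List.filter_map, List.foldl_map]
    unfold pvGapFold
    rw [hM]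
    congr 1
    apply List.filter_congr
    intro i _
    simp only [Function.comp, pvIsIn_singleton]
  rw [hb, pvGapFold_none]
  -- A's second phase equals pvGmin M (10^10)
  by_cases h : 2 < M.length
  · rw [if_pos h, pvIntRangeFold]
  · rw [if_neg h, pvGmin_short M h]
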